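-- pv_equiv track=rewrite | github.com/carluandraster/copiar-funciones | src/eliminar_innecesarios.py | expand_used_symbols
-- ===== SOURCE A (Python) =====
-- from typing import Set, Dict
--
-- def expand_used_symbols(used: Set[str], calls: Dict[str, Set[str]]) -> Set[str]:
--     """Expande el conjunto de símbolos usados siguiendo las llamadas internas.
--
--     :param Set[str] used: Conjunto inicial de símbolos usados.
--     :param Dict[str, Set[str]] calls: Mapa de funciones/clases a las que llaman.
--
--     :return: Conjunto expandido de símbolos usados.
--     """
--     changed = True
--     while changed:
--         changed = False
--         for symbol in list(used):
--             for callee in calls.get(symbol, []):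
--                 if callee not in used:
--                     used.add(callee)
--                     changed = True
--     return used
-- ===== SOURCE B (Python) =====
-- from typing import Set, Dict
--
-- def expand_used_symbols(used: Set[str], calls: Dict[str, Set[str]]) -> Set[str]:
--     """BFS worklist closure: each symbol is processed exactly once (O(V+E))."""
--     queue = list(used)
--     i = 0
--     while i < len(queue):
--         for callee in calls.get(queue[i], ()):
--             if callee not in used:
--                 used.add(callee)
--                 queue.append(callee)
--         i += 1
--     return used
-- ===== Notes on version B (the rewrite author's own statement) =====
-- stated objective: faster
-- what changed: Replaced repeated full rescans of the growing used set until a fixpoint with a BFS worklist queue in which every symbol is processed exactly once.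
import Mathlib
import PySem

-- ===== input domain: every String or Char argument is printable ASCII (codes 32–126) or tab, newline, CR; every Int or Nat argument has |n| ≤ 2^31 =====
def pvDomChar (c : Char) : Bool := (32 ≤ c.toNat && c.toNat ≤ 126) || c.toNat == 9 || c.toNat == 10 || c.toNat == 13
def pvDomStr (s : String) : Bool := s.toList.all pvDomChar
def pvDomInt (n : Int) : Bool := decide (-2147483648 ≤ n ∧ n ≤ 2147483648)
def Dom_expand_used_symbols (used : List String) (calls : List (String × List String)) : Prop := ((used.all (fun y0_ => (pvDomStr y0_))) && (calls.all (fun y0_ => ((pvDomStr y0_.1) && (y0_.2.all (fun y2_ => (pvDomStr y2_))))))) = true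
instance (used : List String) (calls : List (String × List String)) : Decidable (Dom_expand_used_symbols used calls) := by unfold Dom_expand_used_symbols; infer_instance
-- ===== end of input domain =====

-- B replaces A's repeated full rescans until a fixpoint by a BFS worklist in which each
-- symbol is processed once (objective: faster). Python A mutates the `used` set in place
-- and returns it; Python B performs the same mutation; the theorem is about the return value.

-- ===== PORT A =====
-- inner two loops of one pass: for symbol in snapshot / for callee in calls.get(symbol, [])
def pvVisitA (calls : List (String × List String)) (st : List String × Bool) (sym : String) : List String × Bool :=
  (PySem.Dict.getD ⟨calls⟩ sym []).foldl
    (fun st callee => if callee ∈ st.1 then st else (st.1 ++ [callee], true)) st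

-- the `while changed` loop; the fuel is a guard that only makes the loop total:
-- each pass except the last appends at least one callee, so this fuel is never exhausted
def pvLoopA (calls : List (String × List String)) : Nat → List String → List String
  | 0, used => used
  | f + 1, used =>
    let st := used.foldl (pvVisitA calls) (used, false)
    if st.2 then pvLoopA calls f st.1 else used

def expand_used_symbols (used : List String) (calls : List (String × List String)) : List String :=
  pvLoopA calls (used.length + (calls.map (fun kv => kv.2.length)).sum + 1) used

-- ===== PORT B =====
-- `if callee not in used: used.add(callee); queue.append(callee)` (state = (used, queue))
def pvStepB (st : List String × List String) (callee : String) : List String × List String :=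
  if callee ∈ st.1 then st else (st.1 ++ [callee], st.2 ++ [callee])

-- the `while i < len(queue)` worklist loop; fuel is a totality guard, never exhausted:
-- the queue never grows beyond the initial symbols plus all callees
def pvBfsB (calls : List (String × List String)) : Nat → List String → List String → Nat → List String
  | 0, usedS, _, _ => usedS
  | f + 1, usedS, queue, i =>
    if h : i < queue.length then
      let st := (PySem.Dict.getD ⟨calls⟩ queue[i] []).foldl pvStepB (usedS, queue)
      pvBfsB calls f st.1 st.2 (i + 1)
    else usedS

def expand_used_symbols_alt (used : List String) (calls : List (String × List String)) : List String :=
  pvBfsB calls (used.length + (calls.map (fun kv => kv.2.length)).sum + 1) used used 0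

-- ===== PRECONDITION & SPEC =====
def Spec_expand_used_symbols (used : List String) (calls : List (String × List String)) (out : List String) : Prop := out = expand_used_symbols_alt used calls
instance (used : List String) (calls : List (String × List String)) (out : List String) : Decidable (Spec_expand_used_symbols used calls out) := by unfold Spec_expand_used_symbols; infer_instance

-- ===== CLAIM (what is proved, stated in full; the proofs are below) =====
def Claim_equal_expand_used_symbols : Prop := ∀ (used : List String) (calls : List (String × List String)), Dom_expand_used_symbols used calls → Spec_expand_used_symbols used calls (expand_used_symbols used calls)

-- ===== LEMMAS AND PROOFS =====

-- `addList cur l`: append to cur, in order, the elements of l not already present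
def addList (cur l : List String) : List String :=
  l.foldl (fun cur c => if c ∈ cur then cur else cur ++ [c]) cur

-- one visit of a symbol (B's inner loop, and A's inner loop ignoring the flag)
def visit (calls : List (String × List String)) (cur : List String) (sym : String) : List String :=
  addList cur (PySem.Dict.getD ⟨calls⟩ sym [])

-- proof-side single-state version of B's worklist (the two components of B's state are equal)
def bfs1 (calls : List (String × List String)) : Nat → List String → Nat → List String
  | 0, u, _ => u
  | f + 1, u, i =>
    if h : i < u.length then bfs1 calls f (visit calls u u[i]) (i + 1) else u

-- all strings that ever appear as callees (distinct)
def allC (calls : List (String × List String)) : List String :=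
  ((calls.map (fun kv => kv.2)).flatten).dedup

-- callees not yet reached: the quantity that shrinks at every changing pass
def pool (calls : List (String × List String)) (cur : List String) : Nat :=
  ((allC calls).filter (fun x => decide (x ∉ cur))).length

theorem addList_prefix (l cur) : cur <+: addList cur l := by
  induction l generalizing cur with
  | nil => exact List.prefix_refl _
  | cons c l ih =>
    simp only [addList, List.foldl_cons]
    split
    · exact ih cur
    · exact List.IsPrefix.trans ⟨[c], rfl⟩ (ih (cur ++ [c]))

theorem mem_addList {x cur} (l) (h : x ∈ cur) : x ∈ addList cur l :=
  (addList_prefix l cur).subset h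

theorem addList_closed {c : String} (l cur) (h : c ∈ l) : c ∈ addList cur l := by
  induction l generalizing cur with
  | nil => cases h
  | cons a l ih =>
    simp only [addList, List.foldl_cons]
    rcases List.mem_cons.1 h with rfl | hc
    · split
      · exact mem_addList _ ‹c ∈ cur›
      · exact mem_addList _ (by simp)
    · split <;> exact ih _ hc

theorem addList_noop (l cur) (h : ∀ c ∈ l, c ∈ cur) : addList cur l = cur := by
  induction l with
  | nil => rfl
  | cons a l ih =>
    simp only [addList, List.foldl_cons, if_pos (h a (by simp))]
    exact ih fun c hc => h c (by simp [hc])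

theorem addList_adds (l cur) : ∃ adds, addList cur l = cur ++ adds ∧ adds.Nodup ∧
    ∀ x ∈ adds, x ∉ cur ∧ x ∈ l := by
  induction l generalizing cur with
  | nil => exact ⟨[], by simp [addList]⟩
  | cons a l ih =>
    simp only [addList, List.foldl_cons]
    split
    · obtain ⟨adds, h1, h2, h3⟩ := ih cur
      exact ⟨adds, h1, h2, fun x hx => ⟨(h3 x hx).1, by simp [(h3 x hx).2]⟩⟩
    · obtain ⟨adds, h1, h2, h3⟩ := ih (cur ++ [a])
      refine ⟨a :: adds, by simpa using h1, ?_, ?_⟩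
      · exact List.nodup_cons.2 ⟨fun hx => by simpa using (h3 a hx).1, h2⟩
      · intro x hx
        rcases List.mem_cons.1 hx with rfl | hx
        · exact ⟨‹x ∉ cur›, by simp⟩
        · exact ⟨fun hc => (h3 x hx).1 (by simp [hc]), by simp [(h3 x hx).2]⟩

-- the evolving pass state extends the old one (so membership and indices are stable)
theorem foldl_visit_prefix (calls : List (String × List String)) (syms cur : List String) :
    cur <+: syms.foldl (visit calls) cur := by
  induction syms generalizing cur with
  | nil => exact List.prefix_refl _
  | cons s syms ih =>
    exact List.IsPrefix.trans (addList_prefix _ cur) (ih (visit calls cur s))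

-- A's inner pair-fold: first component is addList, flag records growth
theorem foldA_eq (l : List String) (cur : List String) (ch : Bool) :
    l.foldl (fun st callee => if callee ∈ st.1 then st else (st.1 ++ [callee], true)) (cur, ch)
      = (addList cur l, ch || decide (cur.length < (addList cur l).length)) := by
  induction l generalizing cur ch with
  | nil => simp [addList]
  | cons c l ih =>
    simp only [List.foldl_cons, addList, List.foldl_cons]
    by_cases hc : c ∈ cur
    · simp only [if_pos hc]; exact ih cur ch
    · simp only [if_neg hc]
      rw [ih]
      have hlt : cur.length < (addList (cur ++ [c]) l).length := by
        have := (addList_prefix l (cur ++ [c])).length_le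
        simp at this; omega
      refine Prod.ext rfl ?_
      dsimp only
      rw [Bool.true_or]
      show true = (ch || decide (cur.length < (addList (cur ++ [c]) l).length))
      rw [decide_eq_true hlt, Bool.or_true]

-- one pass of A over the snapshot `syms`
theorem passA_eq (calls : List (String × List String)) (syms cur : List String) (ch : Bool) :
    syms.foldl (pvVisitA calls) (cur, ch)
      = (syms.foldl (visit calls) cur,
         ch || decide (cur.length < (syms.foldl (visit calls) cur).length)) := by
  induction syms generalizing cur ch with
  | nil => simp
  | cons s syms ih =>
    simp only [List.foldl_cons, pvVisitA, visit]
    rw [foldA_eq, ih]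
    have h1 : cur.length ≤ (addList cur (PySem.Dict.getD ⟨calls⟩ s [])).length :=
      (addList_prefix _ cur).length_le
    have h2 : (addList cur (PySem.Dict.getD ⟨calls⟩ s [])).length
        ≤ (syms.foldl (visit calls) (addList cur (PySem.Dict.getD ⟨calls⟩ s []))).length :=
      (foldl_visit_prefix calls syms _).length_le
    refine Prod.ext rfl ?_
    dsimp only
    rw [Bool.or_assoc, ← Bool.decide_or]
    congr 1
    rw [decide_eq_decide]
    omega

-- B's pair-fold keeps its two components equal
theorem foldB_eq (l : List String) (a : List String) :
    l.foldl pvStepB (a, a) = (addList a l, addList a l) := by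
  induction l generalizing a with
  | nil => rfl
  | cons c l ih =>
    simp only [List.foldl_cons, pvStepB, addList, List.foldl_cons]
    split
    · exact ih a
    · exact ih (a ++ [c])

-- B's port equals the single-state worklist loop
theorem pvBfsB_eq_bfs1 (calls : List (String × List String)) (f : Nat) (u : List String) (i : Nat) :
    pvBfsB calls f u u i = bfs1 calls f u i := by
  induction f generalizing u i with
  | zero => rfl
  | succ f ih =>
    simp only [pvBfsB, bfs1]
    split
    · rw [foldB_eq]; exact ih _ _
    · rfl

-- every callee delivered by the dict lookup occurs among all callees
theorem mem_allC_of_getD {calls : List (String × List String)} {sym c : String}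
    (h : c ∈ PySem.Dict.getD ⟨calls⟩ sym []) : c ∈ allC calls := by
  rw [allC, List.mem_dedup]
  rw [PySem.Dict.getD, PySem.Dict.get?] at h
  rcases hf : List.find? (fun p => p.1 == sym) (PySem.Dict.mk calls).items with _ | kv
  · rw [hf] at h; cases h
  · rw [hf] at h
    simp only [Option.getD, Option.map] at h
    have hm : kv ∈ calls := List.mem_of_find?_eq_some hf
    exact List.mem_flatten.2 ⟨kv.2, List.mem_map.2 ⟨kv, hm, rfl⟩, h⟩

-- a no-change pass means every visited symbol is already closed
theorem closed_of_foldl_eq (calls : List (String × List String)) (l : List String) :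
    ∀ cur, l.foldl (visit calls) cur = cur →
    ∀ sym ∈ l, ∀ c ∈ PySem.Dict.getD ⟨calls⟩ sym [], c ∈ cur := by
  induction l with
  | nil => intro cur _ sym hs; cases hs
  | cons s l ih =>
    intro cur h sym hs c hc
    simp only [List.foldl_cons] at h
    have hvc : visit calls cur s = cur := by
      have hpre : cur <+: visit calls cur s := addList_prefix _ cur
      have hpre2 : visit calls cur s <+: l.foldl (visit calls) (visit calls cur s) :=
        foldl_visit_prefix calls l _
      refine (hpre.eq_of_length ?_).symm
      have h1 := hpre.length_le
      have h2 := hpre2.length_le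
      rw [h] at h2
      omega
    rw [hvc] at h
    rcases List.mem_cons.1 hs with rfl | hs'
    · rw [← hvc]; exact addList_closed _ _ hc
    · exact ih cur h sym hs' c hc

-- every callee of a visited symbol ends up in the pass result
theorem closed_mem_foldl (calls : List (String × List String)) (l : List String) :
    ∀ (cur : List String) (sym : String), sym ∈ l →
    ∀ c ∈ PySem.Dict.getD ⟨calls⟩ sym [], c ∈ l.foldl (visit calls) cur := by
  induction l with
  | nil => intro _ _ h; cases h
  | cons t l ih =>
    intro cur sym hs c hc
    simp only [List.foldl_cons]
    rcases List.mem_cons.1 hs with rfl | hs'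
    · exact (foldl_visit_prefix calls l _).subset (addList_closed _ _ hc)
    · exact ih _ sym hs' c hc

-- structure of a pass result: old state plus fresh, distinct callees
theorem foldl_visit_adds (calls : List (String × List String)) (l cur : List String) :
    ∃ adds, l.foldl (visit calls) cur = cur ++ adds ∧ adds.Nodup ∧
      ∀ x ∈ adds, x ∉ cur ∧ x ∈ allC calls := by
  induction l generalizing cur with
  | nil => exact ⟨[], by simp⟩
  | cons s l ih =>
    simp only [List.foldl_cons]
    obtain ⟨a1, e1, n1, p1⟩ := addList_adds (PySem.Dict.getD ⟨calls⟩ s []) cur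
    obtain ⟨a2, e2, n2, p2⟩ := ih (visit calls cur s)
    refine ⟨a1 ++ a2, ?_, ?_, ?_⟩
    · rw [e2, visit, e1, List.append_assoc]
    · refine List.Nodup.append n1 n2 ?_
      intro x hx1 hx2
      exact (p2 x hx2).1 (by rw [visit, e1]; simp [hx1])
    · intro x hx
      rcases List.mem_append.1 hx with hx | hx
      · exact ⟨(p1 x hx).1, mem_allC_of_getD (p1 x hx).2⟩
      · refine ⟨fun hc => (p2 x hx).1 ?_, (p2 x hx).2⟩
        exact (addList_prefix _ cur).subset hc

-- counting: a changing pass strictly shrinks the pool of unreached callees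
theorem pool_drop (calls : List (String × List String)) (cur adds : List String)
    (hn : adds.Nodup) (hp : ∀ x ∈ adds, x ∉ cur ∧ x ∈ allC calls) :
    pool calls (cur ++ adds) + adds.length ≤ pool calls cur := by
  have hnodupF : ((allC calls).filter (fun x => decide (x ∉ cur))).Nodup :=
    (List.nodup_dedup _).filter _
  have hsub : (adds ++ (allC calls).filter (fun x => decide (x ∉ cur ++ adds)))
      ⊆ (allC calls).filter (fun x => decide (x ∉ cur)) := by
    intro x hx
    rcases List.mem_append.1 hx with hx | hx
    · exact List.mem_filter.2 ⟨(hp x hx).2, by simpa using (hp x hx).1⟩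
    · obtain ⟨hxF, hxp⟩ := List.mem_filter.1 hx
      refine List.mem_filter.2 ⟨hxF, ?_⟩
      simp only [decide_eq_true_eq] at hxp ⊢
      exact fun hc => hxp (List.mem_append.2 (Or.inl hc))
  have hnodup : (adds ++ (allC calls).filter (fun x => decide (x ∉ cur ++ adds))).Nodup := by
    refine List.Nodup.append hn ((List.nodup_dedup _).filter _) ?_
    intro x hx1 hx2
    obtain ⟨_, hxp⟩ := List.mem_filter.1 hx2
    simp only [decide_eq_true_eq] at hxp
    exact hxp (List.mem_append.2 (Or.inr hx1))
  have := (hnodup.subperm hsub).length_le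
  simpa [pool, Nat.add_comm] using this

-- the pool is bounded by the total number of callee occurrences
theorem pool_le (calls : List (String × List String)) (cur : List String) :
    pool calls cur ≤ (calls.map (fun kv => kv.2.length)).sum := by
  have h1 : pool calls cur ≤ (allC calls).length := List.length_filter_le _ _
  have h2 : (allC calls).length ≤ ((calls.map (fun kv => kv.2)).flatten).length :=
    (List.dedup_sublist _).length_le
  rw [List.length_flatten, List.map_map] at h2
  calc pool calls cur ≤ _ := h1
    _ ≤ _ := h2
    _ = _ := rfl

-- unrolling B's loop over the still-unprocessed prefix indices k..k+d-1 of `cur`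
theorem bfs1_walk (calls : List (String × List String)) (cur : List String) :
    ∀ d k (s : List String) fB, cur <+: s → k + d = cur.length → d ≤ fB →
    bfs1 calls fB s k
      = bfs1 calls (fB - d) (((cur.drop k).take d).foldl (visit calls) s) (k + d) := by
  intro d
  induction d with
  | zero => intro k s fB _ _ _; rfl
  | succ d ih =>
    intro k s fB hpre hk hf
    have hkc : k < cur.length := by omega
    have hks : k < s.length := lt_of_lt_of_le hkc hpre.length_le
    obtain ⟨f, rfl⟩ : ∃ f, fB = f + 1 := ⟨fB - 1, by omega⟩
    rw [bfs1, dif_pos hks]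
    have hsk : s[k] = cur[k] := (hpre.getElem hkc).symm
    rw [List.drop_eq_getElem_cons hkc, List.take_succ_cons, List.foldl_cons, hsk]
    have := ih (k + 1) (visit calls s cur[k]) f
      (hpre.trans (addList_prefix _ s)) (by omega) (by omega)
    rw [this]
    have e1 : f + 1 - (d + 1) = f - d := by omega
    have e2 : k + 1 + d = k + (d + 1) := by omega
    rw [e1, e2]

-- a closed state lets B's loop run to the end without changing anything
theorem bfs1_stop (calls : List (String × List String)) (u : List String)
    (hcl : ∀ j (hj : j < u.length), ∀ c ∈ PySem.Dict.getD ⟨calls⟩ u[j] [], c ∈ u) :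
    ∀ fB k, u.length - k < fB → bfs1 calls fB u k = u := by
  intro fB
  induction fB with
  | zero => intro k h; omega
  | succ fB ih =>
    intro k h
    rw [bfs1]
    split
    · rename_i hk
      have hv : visit calls u u[k] = u := addList_noop _ _ (hcl k hk)
      rw [hv]
      exact ih (k + 1) (by omega)
    · rfl

-- MAIN: A's fixpoint loop equals B's worklist from any properly closed position
theorem main_eq (calls : List (String × List String)) :
    ∀ fA (cur : List String) k fB, k ≤ cur.length →
    (∀ j (hj : j < cur.length), j < k → ∀ c ∈ PySem.Dict.getD ⟨calls⟩ cur[j] [], c ∈ cur) →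
    pool calls cur < fA → (cur.length - k) + pool calls cur < fB →
    pvLoopA calls fA cur = bfs1 calls fB cur k := by
  intro fA
  induction fA with
  | zero => intro cur k fB _ _ h _; omega
  | succ fA ih =>
    intro cur k fB hk hcl hfa hfb
    rw [pvLoopA]
    simp only [passA_eq, Bool.false_or]
    set P := cur.foldl (visit calls) cur with hP
    by_cases hgrow : cur.length < P.length
    · rw [if_pos (by simpa using hgrow)]
      obtain ⟨adds, he, hn, hp⟩ := foldl_visit_adds calls cur cur
      rw [← hP] at he
      have hadds : adds ≠ [] := by
        intro h0; rw [h0, List.append_nil] at he; rw [he] at hgrow; omega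
      have hpool : pool calls P + adds.length ≤ pool calls cur := by
        rw [he]; exact pool_drop calls cur adds hn hp
      have haddslen : 1 ≤ adds.length := List.length_pos_iff.2 hadds
      -- B side: walk the k..cur.length-1 segment, landing exactly on P
      have hwalk := bfs1_walk calls cur (cur.length - k) k cur fB (List.prefix_refl _)
        (by omega) (by omega)
      have htake : (cur.take k).foldl (visit calls) cur = cur := by
        have hnoop : ∀ sym ∈ cur.take k, visit calls cur sym = cur := by
          intro sym hs
          obtain ⟨j, hj, rfl⟩ := List.mem_iff_getElem.1 hs
          have hjk : j < k := by simp [List.length_take] at hj; omega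
          have hjc : j < cur.length := by simp [List.length_take] at hj; omega
          rw [List.getElem_take]
          exact addList_noop _ _ (hcl j hjc hjk)
        generalize cur.take k = l at hnoop
        induction l with
        | nil => rfl
        | cons a l ih2 =>
          rw [List.foldl_cons, hnoop a (by simp)]
          exact ih2 fun sym hs => hnoop sym (by simp [hs])
      have hseg : ((cur.drop k).take (cur.length - k)).foldl (visit calls) cur = P :=
        calc ((cur.drop k).take (cur.length - k)).foldl (visit calls) cur
            = (cur.drop k).foldl (visit calls) cur := by
              rw [List.take_of_length_le (by simp)]
          _ = (cur.drop k).foldl (visit calls) ((cur.take k).foldl (visit calls) cur) := by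
              rw [htake]
          _ = ((cur.take k) ++ (cur.drop k)).foldl (visit calls) cur := by
              rw [List.foldl_append]
          _ = P := by rw [List.take_append_drop, hP]
      rw [hseg] at hwalk
      have hkk : k + (cur.length - k) = cur.length := by omega
      rw [hwalk, hkk]
      -- apply the induction hypothesis at (P, cur.length)
      refine ih P cur.length (fB - (cur.length - k)) (by omega) ?_ (by omega) ?_
      · intro j hj hjn c hc
        have hjP : j < P.length := lt_of_lt_of_le hjn (by rw [he]; simp)
        have hPj : P[j] = cur[j] := (List.IsPrefix.getElem ⟨adds, he.symm⟩ hjn).symm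
        rw [hPj] at hc
        have : cur[j] ∈ cur := List.getElem_mem hjn
        exact closed_mem_foldl calls cur cur cur[j] this c hc
      · have hlenP : P.length = cur.length + adds.length := by rw [he]; simp
        omega
    · rw [if_neg (by simpa using hgrow)]
      have hPeq : P = cur := by
        have hpre : cur <+: P := foldl_visit_prefix calls cur cur
        exact (hpre.eq_of_length (by have := hpre.length_le; omega)).symm
      have hclosedall : ∀ j (hj : j < cur.length), ∀ c ∈ PySem.Dict.getD ⟨calls⟩ cur[j] [], c ∈ cur := by
        intro j hj c hc
        exact closed_of_foldl_eq calls cur cur hPeq cur[j] (List.getElem_mem hj) c hc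
      exact (bfs1_stop calls cur hclosedall fB k (by omega)).symm

-- ===== VERDICT (by name: the statement is the Claim_ definition above) =====
theorem expand_used_symbols_spec : Claim_equal_expand_used_symbols := by
  intro used calls _
  show expand_used_symbols used calls = expand_used_symbols_alt used calls
  rw [expand_used_symbols, expand_used_symbols_alt, pvBfsB_eq_bfs1]
  have hpool := pool_le calls used
  exact main_eq calls _ used 0 _ (Nat.zero_le _) (by omega) (by omega) (by omega)
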